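-- pv_equiv track=rewrite | github.com/arita37/nauta | tools/container-build/filter_plugins/carbon.py | organize_images
-- ===== SOURCE A (Python) =====
-- def organize_images(images):
--     image_names = list(images.keys())
--     image_reqs = {}
--     for image in image_names:
--         if 'required' not in images[image]:
--             image_reqs[image] = []
--         else:
--             image_reqs[image] = [value for key,value in images[image]['required'].items()]
--     layers = []
--
--     while len(image_names) > 0:
--         layer = []
--         for image in image_names:
--             if len(image_reqs[image]) == 0:
--                 layer.append(image)
--         if len(layer) == 0:
--             raise Exception("Loop error: {}".format(image_names))
--         layers.append(layer)
--         for image in layer: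
--             image_names.remove(image)
--             for obs_image in image_names:
--                 if image in image_reqs[obs_image]:
--                     image_reqs[obs_image].remove(image)
--     return layers
-- ===== SOURCE B (Python) =====
-- def organize_images(images):
--     # Kahn's algorithm: reverse adjacency + outstanding-requirement counts, O(V^2 + E)
--     reqs = {name: (list(attrs['required'].values()) if 'required' in attrs else [])
--             for name, attrs in images.items()}
--     counts = {name: len(r) for name, r in reqs.items()}
--     dependents = {}
--     for name, r in reqs.items():
--         for x in r:
--             dependents.setdefault(x, []).append(name)
--     ready = {name for name, c in counts.items() if c == 0}
--     layers = []
--     done = 0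
--     while ready:
--         layer = [name for name in reqs if name in ready]
--         layers.append(layer)
--         done += len(layer)
--         nxt = set()
--         for name in layer:
--             for dep in dependents.get(name, ()):
--                 counts[dep] -= 1
--                 if counts[dep] == 0:
--                     nxt.add(dep)
--         ready = nxt
--     if done != len(reqs):
--         raise Exception("Loop error: {}".format([n for n in reqs if counts[n] != 0]))
--     return layers
-- ===== Notes on version B (the rewrite author's own statement) =====
-- stated objective: faster
-- what changed: Replaces A's repeated full rescans with mutable requirement lists (scan all images each round, then list.remove inside a double loop) by Kahn's topological layering: a reverse-adjacency index and an outstanding-requirement counter per image built once, each round emitting the images whose counter reaches zero, in original insertion order.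
import Mathlib
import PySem

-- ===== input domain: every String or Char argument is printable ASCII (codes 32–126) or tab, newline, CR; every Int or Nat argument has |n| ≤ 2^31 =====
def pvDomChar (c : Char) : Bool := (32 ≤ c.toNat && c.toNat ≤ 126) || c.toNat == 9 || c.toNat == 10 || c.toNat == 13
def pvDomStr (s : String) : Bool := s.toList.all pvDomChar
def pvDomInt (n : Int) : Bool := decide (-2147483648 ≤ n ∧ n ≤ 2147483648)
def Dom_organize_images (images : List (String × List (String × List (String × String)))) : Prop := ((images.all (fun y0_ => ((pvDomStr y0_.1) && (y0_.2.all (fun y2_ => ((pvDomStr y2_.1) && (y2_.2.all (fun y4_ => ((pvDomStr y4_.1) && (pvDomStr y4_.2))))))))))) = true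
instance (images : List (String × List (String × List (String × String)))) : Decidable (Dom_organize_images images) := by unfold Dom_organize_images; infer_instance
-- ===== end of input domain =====

-- B replaces A's repeated scan-and-remove peeling by Kahn's algorithm (reverse adjacency + outstanding-requirement
-- counts); equivalence of the RETURN value is proved on the inputs where A returns (Pre_); A mutates nothing observable.

-- ===== PORT A =====
-- the while-loop of A; fuel = initial number of images (each completed iteration removes at least one image);
-- where Python raises ('Loop error') the port returns the layers built so far — those inputs are outside Pre_.
def pvGoA : Nat → List String → PySem.Dict String (List String) → List (List String) → List (List String)
  | 0, _, _, layers => layers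
  | fuel+1, image_names, image_reqs, layers =>
    if image_names.length = 0 then layers          -- while len(image_names) > 0
    else
      -- layer = [image for image in image_names if len(image_reqs[image]) == 0]
      let layer := image_names.filter (fun image => (image_reqs.getD image []).length == 0)
      if layer.length = 0 then layers              -- Python: raise Exception("Loop error: …")  (outside Pre_)
      else
        let layers' := layers ++ [layer]
        -- for image in layer: image_names.remove(image); for obs in image_names: if image in reqs[obs]: reqs[obs].remove(image)
        let st := layer.foldl (fun (st : List String × PySem.Dict String (List String)) image =>
            let ns := (PySem.List.remove? st.1 image).getD st.1   -- image ∈ st.1 on every reached call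
            let rq := ns.foldl (fun rq obs =>
                if (rq.getD obs []).contains image then
                  rq.modify obs [] (fun l => (PySem.List.remove? l image).getD l)
                else rq) st.2
            (ns, rq)) (image_names, image_reqs)
        pvGoA fuel st.1 st.2 layers'

def organize_images (images : List (String × List (String × List (String × String)))) : List (List String) :=
  let imgd := PySem.Dict.ofList images             -- the parameter is a Python dict
  let image_names := imgd.keys                     -- list(images.keys())
  let image_reqs := image_names.foldl (fun rq image =>
      let attrs := PySem.Dict.ofList ((imgd.get? image).getD [])   -- images[image] (always present)
      if attrs.contains "required" = false then rq.insert image []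
      else rq.insert image ((PySem.Dict.ofList ((attrs.get? "required").getD [])).items.map (·.2)))
    PySem.Dict.empty
  pvGoA image_names.length image_names image_reqs []

-- ===== PORT B =====
-- the while-loop of B; fuel = number of images (each iteration empties a nonempty ready set of distinct images);
-- B's final 'if done != len(reqs): raise' is the same out-of-Pre_ stall as A's and the port returns the layers so far.
def pvGoB : Nat → PySem.Set String → PySem.Dict String Int → PySem.Dict String (List String) → List String → List (List String) → List (List String)
  | 0, _, _, _, _, layers => layers
  | fuel+1, ready, counts, dependents, names, layers =>
    if ready.isEmpty then layers                   -- while ready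
    else
      let layer := names.filter (fun n => PySem.Set.contains ready n)   -- [n for n in reqs if n in ready]
      let layers' := layers ++ [layer]
      let st := layer.foldl (fun (st : PySem.Dict String Int × PySem.Set String) name =>
          (dependents.getD name []).foldl (fun (st : PySem.Dict String Int × PySem.Set String) dep =>
              let c := st.1.modify dep 0 (· - 1)   -- counts[dep] -= 1
              if c.getD dep 0 == 0 then (c, PySem.Set.add st.2 dep) else (c, st.2)) st)
        (counts, PySem.Set.empty)
      pvGoB fuel st.2 st.1 dependents names layers'

def organize_images_alt (images : List (String × List (String × List (String × String)))) : List (List String) :=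
  let reqs : PySem.Dict String (List String) := images.foldl (fun d p =>
      let attrs := PySem.Dict.ofList p.2
      d.insert p.1 (if attrs.contains "required" then
          (PySem.Dict.ofList ((attrs.get? "required").getD [])).items.map (·.2) else []))
    PySem.Dict.empty
  let counts : PySem.Dict String Int := reqs.items.foldl (fun d p => d.insert p.1 (p.2.length : Int)) PySem.Dict.empty
  let dependents : PySem.Dict String (List String) := reqs.items.foldl (fun d p =>
      p.2.foldl (fun d x => d.modify x [] (fun l => l ++ [p.1])) d) PySem.Dict.empty
  let ready : PySem.Set String := PySem.Set.ofList ((counts.items.filter (fun p => p.2 == 0)).map (·.1))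
  pvGoB reqs.size ready counts dependents reqs.keys []

-- ===== PRECONDITION & SPEC =====
-- helpers for Pre_ (independent of both ports): the image names, an image's requirement list, and the
-- monotone 'satisfiable after k rounds' closure of the requirement relation.
def pvN (images : List (String × List (String × List (String × String)))) : List String :=
  (PySem.Dict.ofList images).keys

def pvReq (images : List (String × List (String × List (String × String)))) (image : String) : List String :=
  let attrs := PySem.Dict.ofList (((PySem.Dict.ofList images).get? image).getD [])
  if attrs.contains "required" = false then []
  else (PySem.Dict.ofList ((attrs.get? "required").getD [])).items.map (·.2)

def pvSat (images : List (String × List (String × List (String × String)))) : Nat → String → Bool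
  | 0, _ => false
  | k+1, v => decide (v ∈ pvN images) && (pvReq images v).all (fun r => pvSat images k r)

-- Pre_ = exactly the inputs on which A RETURNS: every requirement list is duplicate-free and points at existing
-- images, and the dependency graph is acyclic (the closure pvSat reaches every image within |images| rounds);
-- on every other input A's peel loop stalls and A raises Exception("Loop error: …").
def Pre_organize_images (images : List (String × List (String × List (String × String)))) : Prop :=
  (∀ v ∈ pvN images, (pvReq images v).Nodup ∧ ∀ r ∈ pvReq images v, r ∈ pvN images) ∧
  (∀ v ∈ pvN images, pvSat images (pvN images).length v = true)
instance (images : List (String × List (String × List (String × String)))) : Decidable (Pre_organize_images images) := by unfold Pre_organize_images; infer_instance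

def pvWitness_organize_images : (List (String × List (String × List (String × String)))) :=
  [("base", []), ("mid", [("required", [("r0", "base")])]), ("top", [("required", [("r0", "mid"), ("r1", "base")])])]

def Spec_organize_images (images : List (String × List (String × List (String × String)))) (out : List (List String)) : Prop := out = organize_images_alt images
instance (images : List (String × List (String × List (String × String)))) (out : List (List String)) : Decidable (Spec_organize_images images out) := by unfold Spec_organize_images; infer_instance

-- ===== CLAIM (what is proved, stated in full; the proofs are below) =====
def Claim_equal_organize_images : Prop := ∀ (images : List (String × List (String × List (String × String)))), Dom_organize_images images → Pre_organize_images images → Spec_organize_images images (organize_images images)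

-- ===== LEMMAS AND PROOFS =====


-- ----- generic list lemmas -----

lemma pv_length_filter_split {a : Type} (l : List a) (p q : a → Bool) :
    (l.filter p).length
      = (l.filter (fun x => p x && q x)).length + (l.filter (fun x => p x && !q x)).length := by
  induction l with
  | nil => simp
  | cons x l ih =>
    simp only [List.filter_cons]
    cases hp : p x <;> cases hq : q x <;> simp [hp, hq, ih] <;> omega

lemma pv_count_filter_nodup {a : Type} [BEq a] [LawfulBEq a] (l : List a) (p : a → Bool) (v : a)
    (h : l.Nodup) : (l.filter p).count v = if v ∈ l ∧ p v = true then 1 else 0 := by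
  by_cases hp : p v = true
  · rw [List.count_filter hp]
    by_cases hm : v ∈ l
    · simp [hm, hp, List.count_eq_one_of_mem h hm]
    · simp [hm, List.count_eq_zero.mpr hm]
  · have : v ∉ l.filter p := by simp [List.mem_filter]; intro _; simpa using hp
    simp [List.count_eq_zero.mpr this, hp]

lemma pv_swap_filter_length {a : Type} [BEq a] [LawfulBEq a] (l : List a) :
    ∀ (m : List a), l.Nodup → m.Nodup →
    (l.filter (fun x => decide (x ∈ m))).length = (m.filter (fun x => decide (x ∈ l))).length := by
  induction l with
  | nil => intro m _ _; simp
  | cons a l ih =>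
    intro m hl hm
    have hal : a ∉ l := (List.nodup_cons.mp hl).1
    have hln : l.Nodup := (List.nodup_cons.mp hl).2
    have h1 : (m.filter (fun x => decide (x ∈ a :: l))).length
        = (m.filter (fun x => decide (x ∈ a :: l) && (x == a))).length
          + (m.filter (fun x => decide (x ∈ a :: l) && !(x == a))).length :=
      pv_length_filter_split m _ _
    have h2 : m.filter (fun x => decide (x ∈ a :: l) && (x == a)) = m.filter (fun x => x == a) := by
      apply List.filter_congr; intro x _
      by_cases hx : x = a <;> simp [hx]
    have h3 : m.filter (fun x => decide (x ∈ a :: l) && !(x == a)) = m.filter (fun x => decide (x ∈ l)) := by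
      apply List.filter_congr; intro x _
      by_cases hx : x = a
      · subst hx; simp [hal]
      · by_cases hxl : x ∈ l <;> simp [hx, hxl]
    have h4 : (m.filter (fun x => x == a)).length = m.count a := by
      simp [List.count, List.countP_eq_length_filter]
    have h5 : m.count a = if a ∈ m then 1 else 0 := by
      by_cases ham : a ∈ m
      · simp [ham, List.count_eq_one_of_mem hm ham]
      · simp [ham, List.count_eq_zero.mpr ham]
    rw [List.filter_cons, h1, h2, h3, h4, h5]
    by_cases ham : a ∈ m <;> simp [ham, ih m hln hm] <;> omega

lemma pv_count_flatMap {a b : Type} [BEq b] [LawfulBEq b] (L : List a) (f : a → List b) (v : b) :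
    ((L.flatMap f).count v) = (L.map (fun x => (f x).count v)).sum := by
  induction L with
  | nil => simp
  | cons x L ih => simp [List.count_append, ih]

lemma pv_sum_if {a : Type} (L : List a) (p : a → Bool) :
    (L.map (fun x => if p x then 1 else 0)).sum = (L.filter p).length := by
  induction L with
  | nil => simp
  | cons x L ih => cases h : p x <;> simp [h, ih] <;> omega

-- ----- dict construction lemmas -----

lemma pv_get?_foldl_insert_map {b v : Type} (g : b → v) (l : List (String × b)) (k : String) :
    (l.foldl (fun d p => d.insert p.1 (g p.2)) PySem.Dict.empty).get? k
      = ((PySem.Dict.ofList l).get? k).map g := by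
  induction l using List.reverseRecOn with
  | nil => simp [PySem.Dict.ofList, PySem.Dict.update, PySem.Dict.get?_empty]
  | append_singleton l p ih =>
    simp only [PySem.Dict.ofList, PySem.Dict.update, List.foldl_append, List.foldl_cons,
      List.foldl_nil] at *
    rw [PySem.Dict.get?_insert, PySem.Dict.get?_insert]
    by_cases hk : k = p.1 <;> simp [hk, ih]

-- ----- A-side step lemmas -----

lemma pv_updA_getD (image : String) (rq : PySem.Dict String (List String)) (obs v : String) :
    ((if (rq.getD obs []).contains image then
        rq.modify obs [] (fun l => (PySem.List.remove? l image).getD l) else rq).getD v [])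
      = if v = obs then (rq.getD v []).erase image else rq.getD v [] := by
  by_cases hc : (rq.getD obs []).contains image
  · simp only [hc, if_true, PySem.Dict.getD_modify]
    by_cases hv : v = obs
    · subst hv
      have hm : image ∈ rq.getD v [] := by simpa using hc
      simp [PySem.List.remove?_eq_some_erase _ _ hm]
    · simp [hv]
  · simp only [hc, if_false]
    by_cases hv : v = obs
    · subst hv
      have hm : image ∉ rq.getD v [] := by simpa using hc
      simp [List.erase_of_not_mem hm]
    · simp [hv]

lemma pv_foldUpd_getD (image : String) (ns : List String) (hns : ns.Nodup) (v : String) :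
    ∀ rq : PySem.Dict String (List String),
    ((ns.foldl (fun rq obs =>
        if (rq.getD obs []).contains image then
          rq.modify obs [] (fun l => (PySem.List.remove? l image).getD l)
        else rq) rq).getD v [])
      = if v ∈ ns then (rq.getD v []).erase image else rq.getD v [] := by
  induction ns with
  | nil => intro rq; simp
  | cons obs ns ih =>
    intro rq
    have hobs : obs ∉ ns := (List.nodup_cons.mp hns).1
    have hnd : ns.Nodup := (List.nodup_cons.mp hns).2
    rw [List.foldl_cons, ih hnd, pv_updA_getD]
    by_cases hv : v ∈ ns
    · have hvo : v ≠ obs := fun h => hobs (h ▸ hv)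
      simp [hv, hvo]
    · by_cases hvo : v = obs
      · subst hvo; simp [hv]
      · simp [hv, hvo]

lemma pv_stepA (layer : List String) :
    ∀ (names : List String) (rq : PySem.Dict String (List String)),
    layer.Nodup → (∀ x ∈ layer, x ∈ names) → names.Nodup →
    (∀ v ∈ names, (rq.getD v []).Nodup) →
    ((layer.foldl (fun (st : List String × PySem.Dict String (List String)) image =>
        ((PySem.List.remove? st.1 image).getD st.1,
          ((PySem.List.remove? st.1 image).getD st.1).foldl (fun rq obs =>
            if (rq.getD obs []).contains image then
              rq.modify obs [] (fun l => (PySem.List.remove? l image).getD l)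
            else rq) st.2)) (names, rq)).1 = names.filter (fun v => !layer.contains v)
     ∧ ∀ v ∈ names.filter (fun v => !layer.contains v),
        ((layer.foldl (fun (st : List String × PySem.Dict String (List String)) image =>
          ((PySem.List.remove? st.1 image).getD st.1,
            ((PySem.List.remove? st.1 image).getD st.1).foldl (fun rq obs =>
              if (rq.getD obs []).contains image then
                rq.modify obs [] (fun l => (PySem.List.remove? l image).getD l)
              else rq) st.2)) (names, rq)).2.getD v []) = (rq.getD v []).filter (fun r => !layer.contains r)) := by
  induction layer with
  | nil =>
    intro names rq _ _ _ _
    constructor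
    · simp
    · intro v _; simp
  | cons image rest ih =>
    intro names rq hnd hsub hnods hrqnd
    have himg : image ∉ rest := (List.nodup_cons.mp hnd).1
    have hrest : rest.Nodup := (List.nodup_cons.mp hnd).2
    have himgn : image ∈ names := hsub image List.mem_cons_self
    rw [List.foldl_cons]
    dsimp only
    rw [PySem.List.remove?_eq_some_erase _ _ himgn]
    dsimp only [Option.getD_some]
    have hnse : (names.erase image).Nodup := hnods.erase image
    have hsub' : ∀ x ∈ rest, x ∈ names.erase image := by
      intro x hx
      have hxi : x ≠ image := fun h => himg (h ▸ hx)
      exact (List.mem_erase_of_ne hxi).mpr (hsub x (List.mem_cons_of_mem _ hx))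
    have hrq' : ∀ v ∈ names.erase image,
        (((names.erase image).foldl (fun rq obs =>
            if (rq.getD obs []).contains image then
              rq.modify obs [] (fun l => (PySem.List.remove? l image).getD l)
            else rq) rq).getD v []).Nodup := by
      intro v hv
      rw [pv_foldUpd_getD image _ hnse v rq]
      simp only [hv, if_true]
      exact ((hrqnd v (List.mem_of_mem_erase hv))).erase image
    obtain ⟨ih1, ih2⟩ := ih (names.erase image) _ hrest hsub' hnse hrq'
    have hfe : (names.erase image).filter (fun v => !rest.contains v)
        = names.filter (fun v => !(image :: rest).contains v) := by
      rw [hnods.erase_eq_filter image, List.filter_filter]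
      apply List.filter_congr
      intro x _
      by_cases hx : x = image
      · subst hx; simp
      · by_cases hxr : x ∈ rest <;> simp [hx, hxr, Ne.symm hx]
    constructor
    · rw [ih1, hfe]
    · intro v hv
      rw [← hfe] at hv
      rw [ih2 v hv]
      have hvns : v ∈ names.erase image := List.mem_of_mem_filter hv
      rw [pv_foldUpd_getD image _ hnse v rq]
      simp only [hvns, if_true]
      have hvn : v ∈ names := List.mem_of_mem_erase hvns
      rw [(hrqnd v hvn).erase_eq_filter image, List.filter_filter]
      apply List.filter_congr
      intro x _
      by_cases hx : x = image
      · subst hx; simp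
      · by_cases hxr : x ∈ rest <;> simp [hx, hxr, Ne.symm hx]

-- ----- B-side step lemma -----

lemma pv_stepB (E : List String) :
    ∀ (counts : PySem.Dict String Int) (nxt : PySem.Set String) (c0 : String → Int),
    (∀ v, counts.getD v 0 ≤ c0 v) →
    (∀ v, v ∈ nxt ↔ (counts.getD v 0 ≤ 0 ∧ 0 < c0 v)) →
    ((∀ v, (E.foldl (fun (st : PySem.Dict String Int × PySem.Set String) dep =>
          if (st.1.modify dep 0 (· - 1)).getD dep 0 == 0 then
            (st.1.modify dep 0 (· - 1), PySem.Set.add st.2 dep)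
          else (st.1.modify dep 0 (· - 1), st.2)) (counts, nxt)).1.getD v 0
        = counts.getD v 0 - (E.count v : Int))
     ∧ (∀ v, v ∈ (E.foldl (fun (st : PySem.Dict String Int × PySem.Set String) dep =>
          if (st.1.modify dep 0 (· - 1)).getD dep 0 == 0 then
            (st.1.modify dep 0 (· - 1), PySem.Set.add st.2 dep)
          else (st.1.modify dep 0 (· - 1), st.2)) (counts, nxt)).2
        ↔ ((E.foldl (fun (st : PySem.Dict String Int × PySem.Set String) dep =>
          if (st.1.modify dep 0 (· - 1)).getD dep 0 == 0 then
            (st.1.modify dep 0 (· - 1), PySem.Set.add st.2 dep)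
          else (st.1.modify dep 0 (· - 1), st.2)) (counts, nxt)).1.getD v 0 ≤ 0
          ∧ 0 < c0 v))) := by
  induction E with
  | nil =>
    intro counts nxt c0 hle hinv
    constructor
    · intro v; simp
    · intro v; simpa using hinv v
  | cons dep E ih =>
    intro counts nxt c0 hle hinv
    rw [List.foldl_cons]
    dsimp only
    have hmod : ∀ v, (counts.modify dep 0 (· - 1)).getD v 0
        = if v = dep then counts.getD dep 0 - 1 else counts.getD v 0 :=
      fun v => PySem.Dict.getD_modify counts dep v 0 (· - 1)
    have hle' : ∀ v, (counts.modify dep 0 (· - 1)).getD v 0 ≤ c0 v := by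
      intro v; rw [hmod]
      by_cases hv : v = dep
      · subst hv; simp only [if_true]; have := hle v; omega
      · simp only [hv, if_false]; exact hle v
    by_cases hz : (counts.modify dep 0 (· - 1)).getD dep 0 = 0
    · rw [if_pos (by simpa using hz)]
      have hinv' : ∀ v, v ∈ PySem.Set.add nxt dep ↔
          ((counts.modify dep 0 (· - 1)).getD v 0 ≤ 0 ∧ 0 < c0 v) := by
        intro v
        rw [PySem.Set.mem_add, hinv v, hmod]
        by_cases hv : v = dep
        · subst hv
          have h1 := hmod v
          rw [if_pos rfl] at h1
          rw [h1] at hz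
          have h2 := hle v
          rw [if_pos rfl]
          constructor
          · intro _
            exact ⟨by omega, by omega⟩
          · intro _
            exact Or.inr rfl
        · simp [hv]
      obtain ⟨r1, r2⟩ := ih _ _ c0 hle' hinv'
      refine ⟨?_, r2⟩
      intro v
      rw [r1 v, hmod, List.count_cons]
      by_cases hv : v = dep
      · subst hv; simp; omega
      · have hdv : (dep == v) = false := beq_eq_false_iff_ne.mpr (fun h => hv h.symm)
        simp only [hv, if_false, hdv, Bool.false_eq_true]
        push_cast
        omega
    · rw [if_neg (by simpa using hz)]
      have hinv' : ∀ v, v ∈ nxt ↔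
          ((counts.modify dep 0 (· - 1)).getD v 0 ≤ 0 ∧ 0 < c0 v) := by
        intro v
        rw [hinv v, hmod]
        by_cases hv : v = dep
        · subst hv
          have h1 := hmod v
          rw [if_pos rfl] at h1
          rw [h1] at hz
          have h2 := hle v
          rw [if_pos rfl]
          constructor
          · intro hh; exact ⟨by omega, hh.2⟩
          · intro hh; exact ⟨by omega, hh.2⟩
        · simp [hv]
      obtain ⟨r1, r2⟩ := ih _ _ c0 hle' hinv'
      refine ⟨?_, r2⟩
      intro v
      rw [r1 v, hmod, List.count_cons]
      by_cases hv : v = dep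
      · subst hv; simp; omega
      · have hdv : (dep == v) = false := beq_eq_false_iff_ne.mpr (fun h => hv h.symm)
        simp only [hv, if_false, hdv, Bool.false_eq_true]
        push_cast
        omega

-- ----- pvSat basic lemmas -----

lemma pv_sat_succ (images : List (String × List (String × List (String × String)))) (k : Nat) (v : String) :
    pvSat images (k+1) v
      = (decide (v ∈ pvN images) && (pvReq images v).all (fun r => pvSat images k r)) := rfl

lemma pv_sat_mem {images : List (String × List (String × List (String × String)))} {k : Nat} {v : String}
    (h : pvSat images (k+1) v = true) : v ∈ pvN images := by
  simp [pvSat] at h; exact h.1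

lemma pv_sat_mono {images : List (String × List (String × List (String × String)))} :
    ∀ {k : Nat} {v : String}, pvSat images k v = true → pvSat images (k+1) v = true := by
  intro k
  induction k with
  | zero => intro v h; simp [pvSat] at h
  | succ k ih =>
    intro v h
    rw [pv_sat_succ] at h
    rw [pv_sat_succ]
    simp only [Bool.and_eq_true, decide_eq_true_eq, List.all_eq_true] at h ⊢
    exact ⟨h.1, fun r hr => ih (h.2 r hr)⟩

lemma pv_sat_stuck {images : List (String × List (String × List (String × String)))} {k : Nat}
    (h : ∀ v, pvSat images (k+1) v = pvSat images k v) :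
    ∀ (m : Nat) (v : String), pvSat images (k+m) v = pvSat images k v := by
  intro m
  induction m with
  | zero => intro v; rfl
  | succ m ih =>
    intro v
    have hkm : k + (m + 1) = (k + m) + 1 := by omega
    rw [hkm, Bool.eq_iff_iff, pv_sat_succ]
    simp only [Bool.and_eq_true, List.all_eq_true, decide_eq_true_eq]
    constructor
    · rintro ⟨hvN, hall⟩
      rw [← h v, pv_sat_succ]
      simp only [Bool.and_eq_true, List.all_eq_true, decide_eq_true_eq]
      exact ⟨hvN, fun r hr => (ih r) ▸ hall r hr⟩
    · intro hv
      have h1 : pvSat images (k+1) v = true := by rw [h v]; exact hv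
      rw [pv_sat_succ] at h1
      simp only [Bool.and_eq_true, List.all_eq_true, decide_eq_true_eq] at h1
      exact ⟨h1.1, fun r hr => (ih r) ▸ h1.2 r hr⟩

lemma pv_nodup_N (images : List (String × List (String × List (String × String)))) :
    (pvN images).Nodup := PySem.Dict.nodup_keys_ofList images

-- ----- the main loop equivalence -----

lemma pv_main (images : List (String × List (String × List (String × String))))
    (hPre : Pre_organize_images images)
    (deps : PySem.Dict String (List String))
    (hdep : ∀ c, deps.getD c [] = (pvN images).filter (fun n => decide (c ∈ pvReq images n))) :
    ∀ (fuel k : Nat) (namesA : List String) (rqA : PySem.Dict String (List String))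
      (counts : PySem.Dict String Int) (ready : PySem.Set String) (acc : List (List String)),
    k + fuel = (pvN images).length →
    namesA = (pvN images).filter (fun v => !pvSat images k v) →
    (∀ v ∈ namesA, rqA.getD v [] = (pvReq images v).filter (fun r => !pvSat images k r)) →
    (∀ v ∈ pvN images, counts.getD v 0 = (((pvReq images v).filter (fun r => !pvSat images k r)).length : Int)) →
    (∀ v, v ∉ pvN images → counts.getD v 0 = 0) →
    (∀ v, v ∈ ready ↔ (v ∈ pvN images ∧ pvSat images (k+1) v = true ∧ pvSat images k v = false)) →
    pvGoA fuel namesA rqA acc = pvGoB fuel ready counts deps (pvN images) acc := by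
  obtain ⟨hPre1, hPre2⟩ := hPre
  have hNnd : (pvN images).Nodup := pv_nodup_N images
  intro fuel
  induction fuel with
  | zero => intro k namesA rqA counts ready acc _ _ _ _ _ _; rfl
  | succ fuel ih =>
    intro k namesA rqA counts ready acc hk h1 h2 h3 h3' h4
    have hnamesnd : namesA.Nodup := h1 ▸ hNnd.filter _
    by_cases hemp : namesA = []
    · have hallsat : ∀ v ∈ pvN images, pvSat images k v = true := by
        intro v hv
        by_contra hns
        have hvn : v ∈ namesA := by
          rw [h1]
          exact List.mem_filter.mpr ⟨hv, by rw [Bool.eq_false_iff.mpr hns]; rfl⟩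
        simp [hemp] at hvn
      have hready : ready = [] := by
        rw [List.eq_nil_iff_forall_not_mem]
        intro v hv
        obtain ⟨hvN, _, hfalse⟩ := (h4 v).mp hv
        rw [hallsat v hvN] at hfalse
        exact Bool.true_eq_false ▸ hfalse
      simp [pvGoA, pvGoB, hemp, hready]
    · obtain ⟨v0, hv0⟩ := List.exists_mem_of_ne_nil namesA hemp
      have hv0' := List.mem_filter.mp (h1 ▸ hv0)
      have hv0N : v0 ∈ pvN images := hv0'.1
      have hv0sat : pvSat images k v0 = false := by
        have := hv0'.2; revert this; cases pvSat images k v0 <;> simp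
      have hlayer_ne : ∃ v1 ∈ pvN images,
          pvSat images (k+1) v1 = true ∧ pvSat images k v1 = false := by
        by_contra hno
        push_neg at hno
        have hstuck : ∀ v, pvSat images (k+1) v = pvSat images k v := by
          intro v
          cases hsk : pvSat images k v with
          | true => exact pv_sat_mono hsk
          | false =>
            cases hsk1 : pvSat images (k+1) v with
            | false => rfl
            | true =>
              have hvN := pv_sat_mem hsk1
              exact absurd hsk (hno v hvN hsk1)
        have hs := pv_sat_stuck hstuck (fuel+1) v0
        rw [hk] at hs
        rw [hPre2 v0 hv0N, hv0sat] at hs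
        exact Bool.true_eq_false ▸ hs
      obtain ⟨v1, hv1N, hv1s, hv1f⟩ := hlayer_ne
      have hmonok : ∀ r, pvSat images k r = true → pvSat images (k+1) r = true :=
        fun r hr => pv_sat_mono hr
      have hmemL : ∀ r, r ∈ (pvN images).filter
          (fun v => pvSat images (k+1) v && !pvSat images k v)
          ↔ (r ∈ pvN images ∧ pvSat images (k+1) r = true ∧ pvSat images k r = false) := by
        intro r
        rw [List.mem_filter]
        constructor
        · rintro ⟨hrN, hb⟩
          refine ⟨hrN, ?_, ?_⟩ <;> revert hb <;>
            cases pvSat images (k+1) r <;> cases pvSat images k r <;> simp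
        · rintro ⟨hrN, hb1, hb2⟩
          exact ⟨hrN, by rw [hb1, hb2]; rfl⟩
      -- A's layer
      have hlayerA : namesA.filter (fun image => (rqA.getD image []).length == 0)
          = (pvN images).filter (fun v => pvSat images (k+1) v && !pvSat images k v) := by
        rw [h1, List.filter_filter]
        apply List.filter_congr
        intro v hvN
        cases hsk : pvSat images k v with
        | true => simp [hsk]
        | false =>
          have hvnames : v ∈ namesA := by
            rw [h1]; exact List.mem_filter.mpr ⟨hvN, by rw [hsk]; rfl⟩
          rw [h2 v hvnames]
          have hiff : ((pvReq images v).filter (fun r => !pvSat images k r) = [])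
              ↔ pvSat images (k+1) v = true := by
            rw [List.filter_eq_nil_iff, pv_sat_succ]
            simp [hvN, List.all_eq_true]
          rw [Bool.eq_iff_iff]
          simp only [Bool.and_eq_true, Bool.not_eq_true', hsk, beq_iff_eq,
            List.length_eq_zero_iff, Bool.not_false, Bool.and_true, hiff]
      have hLnd : ((pvN images).filter
          (fun v => pvSat images (k+1) v && !pvSat images k v)).Nodup := hNnd.filter _
      have hLsub : ∀ x ∈ (pvN images).filter
          (fun v => pvSat images (k+1) v && !pvSat images k v), x ∈ namesA := by
        intro x hx
        obtain ⟨hxN, _, hxf⟩ := (hmemL x).mp hx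
        rw [h1]
        exact List.mem_filter.mpr ⟨hxN, by rw [hxf]; rfl⟩
      have hv1L : v1 ∈ (pvN images).filter
          (fun v => pvSat images (k+1) v && !pvSat images k v) :=
        (hmemL v1).mpr ⟨hv1N, hv1s, hv1f⟩
      have hv1r : v1 ∈ ready := (h4 v1).mpr ⟨hv1N, hv1s, hv1f⟩
      have hreadyne : ready.isEmpty = false := by
        cases hr : ready with
        | nil => rw [hr] at hv1r; cases hv1r
        | cons a t => rfl
      have hlayerB : (pvN images).filter (fun n => PySem.Set.contains ready n)
          = (pvN images).filter (fun v => pvSat images (k+1) v && !pvSat images k v) := by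
        apply List.filter_congr
        intro v hvN
        rw [Bool.eq_iff_iff, PySem.Set.contains_iff, h4 v]
        constructor
        · rintro ⟨_, hb1, hb2⟩; rw [hb1, hb2]; rfl
        · intro hb
          refine ⟨hvN, ?_, ?_⟩ <;> revert hb <;>
            cases pvSat images (k+1) v <;> cases pvSat images k v <;> simp
      have hlenA : ¬ (namesA.length = 0) := by simp [List.length_eq_zero_iff, hemp]
      have hLne : ((pvN images).filter
          (fun v => pvSat images (k+1) v && !pvSat images k v)) ≠ [] := by
        intro h; rw [h] at hv1L; cases hv1L
      have hlayerlen : ¬ (((pvN images).filter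
          (fun v => pvSat images (k+1) v && !pvSat images k v)).length = 0) := by
        simp [List.length_eq_zero_iff, hLne]
      -- unfold one step of both loops
      rw [pvGoA, pvGoB]
      simp only [hreadyne, Bool.false_eq_true, if_false, hlenA, hlayerA, hlayerB, hlayerlen,
        if_true]
      set L := List.filter (fun v => pvSat images (k + 1) v && !pvSat images k v)
        (pvN images) with hLdef
      have hrqnd : ∀ v ∈ namesA, (rqA.getD v []).Nodup := by
        intro v hv
        rw [h2 v hv]
        have hvN : v ∈ pvN images := (List.mem_filter.mp (h1 ▸ hv)).1
        exact ((hPre1 v hvN).1).filter _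
      obtain ⟨hstA1, hstA2⟩ := pv_stepA L namesA rqA hLnd hLsub hnamesnd hrqnd
      rw [← List.foldl_flatMap]
      obtain ⟨hB1, hB2⟩ := pv_stepB (L.flatMap (fun name => deps.getD name []))
        counts PySem.Set.empty (fun v => counts.getD v 0) (fun v => le_refl _)
        (by intro v; simp only [PySem.Set.empty]; simp)
      have hEcount : ∀ v, (((L.flatMap (fun name => deps.getD name [])).count v : Int))
          = if v ∈ pvN images then
              (((pvReq images v).filter (fun r => decide (r ∈ L))).length : Int) else 0 := by
        intro v
        rw [pv_count_flatMap]
        by_cases hvN : v ∈ pvN images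
        · have hcongr : ∀ im ∈ L, (deps.getD im []).count v
              = if decide (im ∈ pvReq images v) = true then 1 else 0 := by
            intro im _
            rw [hdep im, pv_count_filter_nodup _ _ _ hNnd]
            by_cases him : im ∈ pvReq images v <;> simp [hvN, him]
          rw [List.map_congr_left hcongr,
            pv_sum_if L (fun im => decide (im ∈ pvReq images v)),
            pv_swap_filter_length L (pvReq images v) hLnd ((hPre1 v hvN).1)]
          simp [hvN]
        · have hcongr : ∀ im ∈ L, (deps.getD im []).count v = 0 := by
            intro im _
            rw [hdep im, pv_count_filter_nodup _ _ _ hNnd]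
            simp [hvN]
          rw [List.map_congr_left hcongr]
          simp [hvN]
      have hpt1 : ∀ r ∈ pvN images,
          ((!L.contains r) && !pvSat images k r) = (!pvSat images (k+1) r) := by
        intro r hrN
        have hLc : L.contains r = (pvSat images (k+1) r && !pvSat images k r) := by
          rw [Bool.eq_iff_iff]
          constructor
          · intro hc
            obtain ⟨_, hb1, hb2⟩ := (hmemL r).mp (by simpa using hc)
            rw [hb1, hb2]; rfl
          · intro hb
            have hb2 : pvSat images (k+1) r = true ∧ pvSat images k r = false := by
              revert hb
              cases pvSat images (k+1) r <;> cases pvSat images k r <;> simp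
            have hrL : r ∈ L := (hmemL r).mpr ⟨hrN, hb2⟩
            simpa using hrL
        rw [hLc]
        have hm := hmonok r
        revert hm
        cases pvSat images (k+1) r <;> cases pvSat images k r <;> simp
      have hLmem_req : ∀ r ∈ pvN images,
          decide (r ∈ L) = (pvSat images (k+1) r && !pvSat images k r) := by
        intro r hrN
        rw [Bool.eq_iff_iff]
        simp only [decide_eq_true_eq]
        constructor
        · intro hr
          obtain ⟨_, b1, b2⟩ := (hmemL r).mp hr
          rw [b1, b2]; rfl
        · intro hb
          have hb2 : pvSat images (k+1) r = true ∧ pvSat images k r = false := by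
            revert hb
            cases pvSat images (k+1) r <;> cases pvSat images k r <;> simp
          exact (hmemL r).mpr ⟨hrN, hb2⟩
      have h1' : (L.foldl (fun (st : List String × PySem.Dict String (List String)) image =>
            ((PySem.List.remove? st.1 image).getD st.1,
              ((PySem.List.remove? st.1 image).getD st.1).foldl (fun rq obs =>
                if (rq.getD obs []).contains image then
                  rq.modify obs [] (fun l => (PySem.List.remove? l image).getD l)
                else rq) st.2)) (namesA, rqA)).1
          = (pvN images).filter (fun v => !pvSat images (k+1) v) := by
        rw [hstA1, h1, List.filter_filter]
        exact List.filter_congr hpt1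
      have h2' : ∀ v ∈ (L.foldl (fun (st : List String × PySem.Dict String (List String)) image =>
            ((PySem.List.remove? st.1 image).getD st.1,
              ((PySem.List.remove? st.1 image).getD st.1).foldl (fun rq obs =>
                if (rq.getD obs []).contains image then
                  rq.modify obs [] (fun l => (PySem.List.remove? l image).getD l)
                else rq) st.2)) (namesA, rqA)).1,
          ((L.foldl (fun (st : List String × PySem.Dict String (List String)) image =>
            ((PySem.List.remove? st.1 image).getD st.1,
              ((PySem.List.remove? st.1 image).getD st.1).foldl (fun rq obs =>
                if (rq.getD obs []).contains image then
                  rq.modify obs [] (fun l => (PySem.List.remove? l image).getD l)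
                else rq) st.2)) (namesA, rqA)).2.getD v [])
            = (pvReq images v).filter (fun r => !pvSat images (k+1) r) := by
        intro v hv
        rw [hstA1] at hv
        rw [hstA2 v hv]
        have hvnames : v ∈ namesA := List.mem_of_mem_filter hv
        have hvN : v ∈ pvN images := (List.mem_filter.mp (h1 ▸ hvnames)).1
        rw [h2 v hvnames, List.filter_filter]
        exact List.filter_congr (fun r hr => hpt1 r ((hPre1 v hvN).2 r hr))
      have h3n : ∀ v ∈ pvN images,
          ((L.flatMap (fun name => deps.getD name [])).foldl
            (fun (st : PySem.Dict String Int × PySem.Set String) dep =>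
              if (st.1.modify dep 0 (· - 1)).getD dep 0 == 0 then
                (st.1.modify dep 0 (· - 1), PySem.Set.add st.2 dep)
              else (st.1.modify dep 0 (· - 1), st.2)) (counts, PySem.Set.empty)).1.getD v 0
          = (((pvReq images v).filter (fun r => !pvSat images (k+1) r)).length : Int) := by
        intro v hvN
        rw [hB1 v, h3 v hvN, hEcount v]
        simp only [hvN, if_true]
        have hsplit := pv_length_filter_split (pvReq images v)
          (fun r => !pvSat images k r) (fun r => !pvSat images (k+1) r)
        have e1 : (pvReq images v).filter (fun r => !pvSat images k r && !pvSat images (k+1) r)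
            = (pvReq images v).filter (fun r => !pvSat images (k+1) r) := by
          apply List.filter_congr
          intro r hr
          have hm := hmonok r
          revert hm
          cases pvSat images (k+1) r <;> cases pvSat images k r <;> simp
        have e2 : (pvReq images v).filter (fun r => !pvSat images k r && !(!pvSat images (k+1) r))
            = (pvReq images v).filter (fun r => decide (r ∈ L)) := by
          apply List.filter_congr
          intro r hr
          rw [hLmem_req r ((hPre1 v hvN).2 r hr)]
          cases pvSat images (k+1) r <;> cases pvSat images k r <;> simp
        rw [e1, e2] at hsplit
        push_cast
        omega
      have h3n' : ∀ v, v ∉ pvN images →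
          ((L.flatMap (fun name => deps.getD name [])).foldl
            (fun (st : PySem.Dict String Int × PySem.Set String) dep =>
              if (st.1.modify dep 0 (· - 1)).getD dep 0 == 0 then
                (st.1.modify dep 0 (· - 1), PySem.Set.add st.2 dep)
              else (st.1.modify dep 0 (· - 1), st.2)) (counts, PySem.Set.empty)).1.getD v 0 = 0 := by
        intro v hv
        rw [hB1 v, h3' v hv, hEcount v]
        simp [hv]
      have h4' : ∀ v, v ∈ ((L.flatMap (fun name => deps.getD name [])).foldl
            (fun (st : PySem.Dict String Int × PySem.Set String) dep =>
              if (st.1.modify dep 0 (· - 1)).getD dep 0 == 0 then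
                (st.1.modify dep 0 (· - 1), PySem.Set.add st.2 dep)
              else (st.1.modify dep 0 (· - 1), st.2)) (counts, PySem.Set.empty)).2
          ↔ (v ∈ pvN images ∧ pvSat images (k+1+1) v = true ∧ pvSat images (k+1) v = false) := by
        intro v
        rw [hB2 v]
        by_cases hvN : v ∈ pvN images
        · rw [h3n v hvN, h3 v hvN]
          constructor
          · rintro ⟨hle, hlt⟩
            refine ⟨hvN, ?_, ?_⟩
            · have hnil : (pvReq images v).filter (fun r => !pvSat images (k+1) r) = [] := by
                cases hfl : (pvReq images v).filter (fun r => !pvSat images (k+1) r) with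
                | nil => rfl
                | cons a t => rw [hfl] at hle; simp at hle; omega
              rw [pv_sat_succ]
              rw [List.filter_eq_nil_iff] at hnil
              simp only [Bool.and_eq_true, decide_eq_true_eq, List.all_eq_true]
              refine ⟨hvN, fun r hr => ?_⟩
              have := hnil r hr
              revert this
              cases pvSat images (k+1) r <;> simp
            · by_contra hns
              have hs1 : pvSat images (k+1) v = true := by
                revert hns; cases pvSat images (k+1) v <;> simp
              rw [pv_sat_succ] at hs1
              simp only [Bool.and_eq_true, decide_eq_true_eq, List.all_eq_true] at hs1
              have hnil : (pvReq images v).filter (fun r => !pvSat images k r) = [] :=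
                List.filter_eq_nil_iff.mpr (fun r hr => by rw [hs1.2 r hr]; simp)
              rw [hnil] at hlt
              simp at hlt
          · rintro ⟨_, hs2, hs1f⟩
            constructor
            · have hnil : (pvReq images v).filter (fun r => !pvSat images (k+1) r) = [] := by
                rw [pv_sat_succ] at hs2
                simp only [Bool.and_eq_true, decide_eq_true_eq, List.all_eq_true] at hs2
                exact List.filter_eq_nil_iff.mpr (fun r hr => by rw [hs2.2 r hr]; simp)
              rw [hnil]
              simp
            · have hallf : (pvReq images v).all (fun r => pvSat images k r) = false := by
                rw [pv_sat_succ] at hs1f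
                revert hs1f
                simp [hvN]
              obtain ⟨r, hrR, hrf⟩ := List.all_eq_false.mp hallf
              have hrmem : r ∈ (pvReq images v).filter (fun r => !pvSat images k r) :=
                List.mem_filter.mpr ⟨hrR, by revert hrf; cases pvSat images k r <;> simp⟩
              have hpos := List.length_pos_of_mem hrmem
              exact_mod_cast hpos
        · rw [h3' v hvN]
          simp [hvN]
      exact ih (k+1) _ _ _ _ (acc ++ [L]) (by omega) h1' h2' h3n h3n' h4'
  
  

-- ----- initialization lemmas -----

lemma pv_get?_foldl_insert_fun {v : Type} (l : List String) (f : String → v) (x : String) :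
    (l.foldl (fun d y => d.insert y (f y)) PySem.Dict.empty).get? x
      = if x ∈ l then some (f x) else none := by
  induction l using List.reverseRecOn with
  | nil => simp [PySem.Dict.get?_empty]
  | append_singleton l y ih =>
    rw [List.foldl_append]
    simp only [List.foldl_cons, List.foldl_nil]
    rw [PySem.Dict.get?_insert]
    by_cases hx : x = y
    · subst hx; simp
    · simp [hx, ih]

lemma pv_chunk (rs : List String) (hnd : rs.Nodup) (c v : String) :
    (((rs.map (fun x => (x, v))).filter (fun q => q.1 == c)).map (fun q => q.2))
      = if c ∈ rs then [v] else [] := by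
  induction rs with
  | nil => simp
  | cons r rs ih =>
    have hr : r ∉ rs := (List.nodup_cons.mp hnd).1
    have hih := ih (List.nodup_cons.mp hnd).2
    simp only [List.map_cons, List.filter_cons]
    by_cases hc : r = c
    · subst hc
      have hnil : (rs.map (fun x => (x, v))).filter (fun q => q.1 == r) = [] := by
        rw [List.filter_eq_nil_iff]
        intro q hq
        obtain ⟨x, hx, rfl⟩ := List.mem_map.mp hq
        simp only [beq_iff_eq]
        exact fun h => hr (h ▸ hx)
      simp [hnil]
    · have hbc : ((r, v).1 == c) = false := by simp [hc]
      rw [hbc]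
      simp only [Bool.false_eq_true, if_false]
      rw [hih]
      by_cases hcm : c ∈ rs <;> simp [hcm] <;> exact fun h => hc h.symm

lemma pv_deps_calc (ns : List String) (R : String → List String)
    (hnd : ∀ v ∈ ns, (R v).Nodup) (c : String) :
    ((((ns.map (fun v => (v, R v))).flatMap (fun p => p.2.map (fun x => (x, p.1)))).filter
        (fun q => q.1 == c)).map (fun q => q.2)) = ns.filter (fun n => decide (c ∈ R n)) := by
  induction ns with
  | nil => simp
  | cons n ns ih =>
    have hrn : (R n).Nodup := hnd n List.mem_cons_self
    have hih := ih (fun v hv => hnd v (List.mem_cons_of_mem _ hv))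
    simp only [List.map_cons, List.flatMap_cons, List.filter_append, List.map_append,
      List.filter_cons]
    rw [pv_chunk (R n) hrn c n, hih]
    by_cases hc : c ∈ R n <;> simp [hc]

lemma pv_deps_getD (items : List (String × List String)) (c : String) :
    ((items.foldl (fun (d : PySem.Dict String (List String)) p =>
        p.2.foldl (fun d x => d.modify x [] (fun l => l ++ [p.1])) d) PySem.Dict.empty).getD c [])
      = ((items.flatMap (fun p => p.2.map (fun x => (x, p.1)))).filter
          (fun q => q.1 == c)).map (fun q => q.2) := by
  have hz : (fun (d : PySem.Dict String (List String)) (p : String × List String) =>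
      p.2.foldl (fun d x => d.modify x [] (fun l => l ++ [p.1])) d)
    = (fun d p => (p.2.map (fun x => (x, p.1))).foldl
        (fun d q => d.modify q.1 [] (fun l => l ++ [q.2])) d) := by
    funext d p
    rw [List.foldl_map]
  rw [hz, ← List.foldl_flatMap, PySem.Dict.getD_foldl_modify_append]
  simp

lemma pv_A_init (images : List (String × List (String × List (String × String)))) :
    ∀ v ∈ pvN images,
    (((PySem.Dict.ofList images).keys.foldl (fun rq image =>
        let attrs := PySem.Dict.ofList (((PySem.Dict.ofList images).get? image).getD [])
        if attrs.contains "required" = false then rq.insert image []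
        else rq.insert image ((PySem.Dict.ofList ((attrs.get? "required").getD [])).items.map (·.2)))
      PySem.Dict.empty).getD v []) = pvReq images v := by
  intro v hv
  have hbody : ((PySem.Dict.ofList images).keys.foldl (fun rq image =>
        let attrs := PySem.Dict.ofList (((PySem.Dict.ofList images).get? image).getD [])
        if attrs.contains "required" = false then rq.insert image []
        else rq.insert image ((PySem.Dict.ofList ((attrs.get? "required").getD [])).items.map (·.2)))
      PySem.Dict.empty)
      = ((PySem.Dict.ofList images).keys.foldl (fun rq image =>
          rq.insert image (pvReq images image)) PySem.Dict.empty) := by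
    apply PySem.List.foldl_congr_mem
    intro acc x _
    by_cases hc : (PySem.Dict.ofList (((PySem.Dict.ofList images).get? x).getD [])).contains
        "required" = false <;>
      simp [pvReq, hc]
  rw [hbody, PySem.Dict.getD_eq_get?_getD,
    pv_get?_foldl_insert_fun (PySem.Dict.ofList images).keys (fun image => pvReq images image) v,
    if_pos (show v ∈ (PySem.Dict.ofList images).keys from hv)]
  rfl

lemma pv_B_reqs_keys (images : List (String × List (String × List (String × String)))) :
    (images.foldl (fun d p =>
      d.insert p.1
        (if (PySem.Dict.ofList p.2).contains "required" = true then
          List.map (fun x => x.2)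
            (PySem.Dict.ofList (((PySem.Dict.ofList p.2).get? "required").getD [])).items
        else [])) PySem.Dict.empty).keys = pvN images := by
  rw [PySem.Dict.keys_foldl_insert_key images Prod.fst (fun d p =>
      (if (PySem.Dict.ofList p.2).contains "required" = true then
        List.map (fun x => x.2)
          (PySem.Dict.ofList (((PySem.Dict.ofList p.2).get? "required").getD [])).items
      else [])) PySem.Dict.empty]
  exact (PySem.Dict.keys_foldl_insert_key images Prod.fst (fun d p => p.2) PySem.Dict.empty).symm

lemma pv_B_reqs_items (images : List (String × List (String × List (String × String)))) :
    (images.foldl (fun d p =>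
      d.insert p.1
        (if (PySem.Dict.ofList p.2).contains "required" = true then
          List.map (fun x => x.2)
            (PySem.Dict.ofList (((PySem.Dict.ofList p.2).get? "required").getD [])).items
        else [])) PySem.Dict.empty).items = (pvN images).map (fun w => (w, pvReq images w)) := by
  have hkeys := pv_B_reqs_keys images
  have hknd : ((images.foldl (fun d p =>
      d.insert p.1
        (if (PySem.Dict.ofList p.2).contains "required" = true then
          List.map (fun x => x.2)
            (PySem.Dict.ofList (((PySem.Dict.ofList p.2).get? "required").getD [])).items
        else [])) PySem.Dict.empty)).keys.Nodup := by
    rw [hkeys]; exact pv_nodup_N images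
  rw [PySem.Dict.items_eq_map_keys _ hknd [], hkeys]
  apply List.map_congr_left
  intro v hv
  have hget := pv_get?_foldl_insert_map (g := fun y =>
      (if (PySem.Dict.ofList y).contains "required" = true then
        List.map (fun x => x.2)
          (PySem.Dict.ofList (((PySem.Dict.ofList y).get? "required").getD [])).items
      else [])) images v
  cases h : (PySem.Dict.ofList images).get? v with
  | none =>
    exfalso
    have hnk : v ∉ (PySem.Dict.ofList images).keys :=
      (PySem.Dict.get?_eq_none_iff_not_mem_keys _ _).mp h
    exact hnk hv
  | some a =>
    have hreq : pvReq images v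
        = (if (PySem.Dict.ofList a).contains "required" = true then
            List.map (fun x => x.2)
              (PySem.Dict.ofList (((PySem.Dict.ofList a).get? "required").getD [])).items
          else []) := by
      simp only [pvReq, h, Option.getD_some]
      cases hc : (PySem.Dict.ofList a).contains "required" <;> simp [hc]
    rw [PySem.Dict.getD_eq_get?_getD, hget, h]
    simp only [Option.map_some, Option.getD_some]
    rw [hreq]

lemma pv_items_foldl_insert_pairs {b v : Type} (l : List (String × b)) (g : b → v)
    (hnd : (l.map Prod.fst).Nodup) :
    (l.foldl (fun d p => d.insert p.1 (g p.2)) PySem.Dict.empty).items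
      = l.map (fun p => (p.1, g p.2)) := by
  have h := PySem.Dict.items_foldl_insert_fresh l Prod.fst (fun p => g p.2) PySem.Dict.empty
    (by intro a _; simp) hnd
  simpa using h

-- ===== VERDICT (by name: the statement is the Claim_ definition above) =====
set_option maxHeartbeats 2000000 in
theorem organize_images_spec : Claim_equal_organize_images := by
  intro images hDom hPre
  show organize_images images = organize_images_alt images
  unfold organize_images organize_images_alt
  dsimp only
  rw [show (images.foldl (fun d p =>
      d.insert p.1
        (if (PySem.Dict.ofList p.2).contains "required" = true then
          List.map (fun x => x.2)
            (PySem.Dict.ofList (((PySem.Dict.ofList p.2).get? "required").getD [])).items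
        else [])) PySem.Dict.empty).size = ((pvN images).map (fun w => (w, pvReq images w))).length from by
      rw [← pv_B_reqs_items images]
      rfl,
    List.length_map, pv_B_reqs_keys images, pv_B_reqs_items images]
  have hcitems : (List.foldl (fun (d : PySem.Dict String Int) p => d.insert p.1 (p.2.length : Int)) PySem.Dict.empty ((pvN images).map (fun w => (w, pvReq images w)))).items
      = (pvN images).map (fun w => (w, ((pvReq images w).length : Int))) := by
    rw [pv_items_foldl_insert_pairs ((pvN images).map (fun w => (w, pvReq images w))) (fun y => (y.length : Int))
      (by
        rw [List.map_map, List.map_congr_left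
          (f := Prod.fst ∘ fun w => (w, pvReq images w)) (g := fun a => a)
          (fun a _ => rfl), List.map_id']
        exact pv_nodup_N images), List.map_map]
    rfl
  have hkeysC : (List.foldl (fun (d : PySem.Dict String Int) p => d.insert p.1 (p.2.length : Int)) PySem.Dict.empty ((pvN images).map (fun w => (w, pvReq images w)))).keys = pvN images := by
    show (List.foldl (fun (d : PySem.Dict String Int) p => d.insert p.1 (p.2.length : Int)) PySem.Dict.empty ((pvN images).map (fun w => (w, pvReq images w)))).items.map (fun p => p.1) = pvN images
    rw [hcitems, List.map_map,
      List.map_congr_left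
        (f := (fun p => p.1) ∘ fun w => (w, ((pvReq images w).length : Int)))
        (g := fun a => a) (fun a _ => rfl), List.map_id']
  have hcnd : (List.foldl (fun (d : PySem.Dict String Int) p => d.insert p.1 (p.2.length : Int)) PySem.Dict.empty ((pvN images).map (fun w => (w, pvReq images w)))).keys.Nodup := by
    rw [hkeysC]; exact pv_nodup_N images
  have hcget : ∀ v, (List.foldl (fun (d : PySem.Dict String Int) p => d.insert p.1 (p.2.length : Int)) PySem.Dict.empty ((pvN images).map (fun w => (w, pvReq images w)))).getD v 0
      = if v ∈ pvN images then ((pvReq images v).length : Int) else 0 := by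
    intro v
    by_cases hv : v ∈ pvN images
    · rw [if_pos hv]
      exact PySem.Dict.getD_of_mem_items _
        (by rw [hcitems]; exact List.mem_map.mpr ⟨v, hv, rfl⟩) hcnd 0
    · rw [if_neg hv]
      apply PySem.Dict.getD_of_not_contains
      cases hcb : (List.foldl (fun (d : PySem.Dict String Int) p => d.insert p.1 (p.2.length : Int)) PySem.Dict.empty ((pvN images).map (fun w => (w, pvReq images w)))).contains v with
      | false => rfl
      | true =>
        exfalso
        exact hv (by rw [← hkeysC]; exact (PySem.Dict.contains_iff_mem_keys _ _).mp hcb)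
  have hdep : ∀ c, (List.foldl (fun (d : PySem.Dict String (List String)) p => List.foldl (fun d x => d.modify x [] fun l => l ++ [p.1]) d p.2) PySem.Dict.empty ((pvN images).map (fun w => (w, pvReq images w)))).getD c []
      = (pvN images).filter (fun n => decide (c ∈ pvReq images n)) := by
    intro c
    rw [pv_deps_getD, pv_deps_calc (pvN images) (fun w => pvReq images w)
      (fun v hv => (hPre.1 v hv).1) c]
  have h4 : ∀ v, v ∈ (PySem.Set.ofList (List.map (fun x => x.1) (List.filter (fun p => p.2 == 0) (List.foldl (fun (d : PySem.Dict String Int) p => d.insert p.1 (p.2.length : Int)) PySem.Dict.empty ((pvN images).map (fun w => (w, pvReq images w)))).items)))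
      ↔ (v ∈ pvN images ∧ pvSat images (0+1) v = true ∧ pvSat images 0 v = false) := by
    intro v
    rw [PySem.Set.mem_ofList]
    constructor
    · intro hvm
      obtain ⟨p, hp, hpv⟩ := List.mem_map.mp hvm
      obtain ⟨hpmem, hz⟩ := List.mem_filter.mp hp
      rw [hcitems] at hpmem
      obtain ⟨w, hw, rfl⟩ := List.mem_map.mp hpmem
      simp only [beq_iff_eq] at hpv hz
      have hz' : pvReq images w = [] := by simpa using hz
      subst hpv
      refine ⟨hw, ?_, rfl⟩
      rw [pv_sat_succ]
      simp [hw, hz']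
    · rintro ⟨hvN, hs1, _⟩
      have hnil : pvReq images v = [] := by
        rw [pv_sat_succ] at hs1
        simp only [Bool.and_eq_true, decide_eq_true_eq, List.all_eq_true] at hs1
        cases hR : pvReq images v with
        | nil => rfl
        | cons a t =>
          exfalso
          have ha := hs1.2 a (by rw [hR]; exact List.mem_cons_self)
          simp [pvSat] at ha
      apply List.mem_map.mpr
      refine ⟨(v, ((pvReq images v).length : Int)), List.mem_filter.mpr ⟨?_, ?_⟩, rfl⟩
      · rw [hcitems]
        exact List.mem_map.mpr ⟨v, hvN, rfl⟩
      · simp [hnil]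
  have hA1 : (PySem.Dict.ofList images).keys
      = (pvN images).filter (fun v => !pvSat images 0 v) :=
    (List.filter_eq_self.mpr (fun a _ => rfl)).symm
  have hA2 : ∀ v ∈ (PySem.Dict.ofList images).keys,
      (List.foldl (fun rq image =>
        let attrs := PySem.Dict.ofList (((PySem.Dict.ofList images).get? image).getD [])
        if attrs.contains "required" = false then rq.insert image []
        else rq.insert image ((PySem.Dict.ofList ((attrs.get? "required").getD [])).items.map (·.2)))
      PySem.Dict.empty (PySem.Dict.ofList images).keys).getD v [] = (pvReq images v).filter (fun r => !pvSat images 0 r) := by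
    intro v hv
    rw [pv_A_init images v hv]
    exact (List.filter_eq_self.mpr (fun a _ => rfl)).symm
  have hC1 : ∀ v ∈ pvN images, (List.foldl (fun (d : PySem.Dict String Int) p => d.insert p.1 (p.2.length : Int)) PySem.Dict.empty ((pvN images).map (fun w => (w, pvReq images w)))).getD v 0
      = (((pvReq images v).filter (fun r => !pvSat images 0 r)).length : Int) := by
    intro v hv
    rw [hcget v, if_pos hv, List.filter_eq_self.mpr
      (fun a _ => rfl : ∀ a ∈ pvReq images v, (!pvSat images 0 a) = true)]
  have hC2 : ∀ v, v ∉ pvN images → (List.foldl (fun (d : PySem.Dict String Int) p => d.insert p.1 (p.2.length : Int)) PySem.Dict.empty ((pvN images).map (fun w => (w, pvReq images w)))).getD v 0 = 0 := by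
    intro v hv
    rw [hcget v, if_neg hv]
  exact pv_main images hPre (List.foldl (fun (d : PySem.Dict String (List String)) p => List.foldl (fun d x => d.modify x [] fun l => l ++ [p.1]) d p.2) PySem.Dict.empty ((pvN images).map (fun w => (w, pvReq images w)))) hdep
    ((PySem.Dict.ofList images).keys.length) 0 (PySem.Dict.ofList images).keys
    (List.foldl (fun rq image =>
        let attrs := PySem.Dict.ofList (((PySem.Dict.ofList images).get? image).getD [])
        if attrs.contains "required" = false then rq.insert image []
        else rq.insert image ((PySem.Dict.ofList ((attrs.get? "required").getD [])).items.map (·.2)))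
      PySem.Dict.empty (PySem.Dict.ofList images).keys) (List.foldl (fun (d : PySem.Dict String Int) p => d.insert p.1 (p.2.length : Int)) PySem.Dict.empty ((pvN images).map (fun w => (w, pvReq images w)))) (PySem.Set.ofList (List.map (fun x => x.1) (List.filter (fun p => p.2 == 0) (List.foldl (fun (d : PySem.Dict String Int) p => d.insert p.1 (p.2.length : Int)) PySem.Dict.empty ((pvN images).map (fun w => (w, pvReq images w)))).items))) []
    (Nat.zero_add _) hA1 hA2 hC1 hC2 h4
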